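-- pv_equiv track=rewrite | github.com/ali-hy/alx-higher_level_programming | 0x04-python-more_data_structures/2-uniq_add.py | uniq_add
-- ===== SOURCE A (Python) =====
-- def uniq_add(my_list=[]):
--     added = set()
--     res = 0
--     for i in my_list:
--         if i in added:
--             continue
--         res += i
--         added.add(i)
--     return res
-- ===== SOURCE B (Python) =====
-- _MISSING = object()
--
--
-- def uniq_add(my_list=[]):
--     # Sort first, then a linear scan that adds each value only when it
--     # differs from its predecessor (duplicates are adjacent after sorting).
--     res = 0
--     prev = _MISSING
--     for v in sorted(my_list):
--         if v != prev:
--             res += v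
--             prev = v
--     return res
-- ===== Notes on version B (the rewrite author's own statement) =====
-- stated objective: alternative
-- what changed: Replaces A's hash-set membership guard with a sort-then-scan algorithm: sort the list, then sum each element that differs from its predecessor, so duplicates are detected by adjacency instead of a set lookup.
import Mathlib
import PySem

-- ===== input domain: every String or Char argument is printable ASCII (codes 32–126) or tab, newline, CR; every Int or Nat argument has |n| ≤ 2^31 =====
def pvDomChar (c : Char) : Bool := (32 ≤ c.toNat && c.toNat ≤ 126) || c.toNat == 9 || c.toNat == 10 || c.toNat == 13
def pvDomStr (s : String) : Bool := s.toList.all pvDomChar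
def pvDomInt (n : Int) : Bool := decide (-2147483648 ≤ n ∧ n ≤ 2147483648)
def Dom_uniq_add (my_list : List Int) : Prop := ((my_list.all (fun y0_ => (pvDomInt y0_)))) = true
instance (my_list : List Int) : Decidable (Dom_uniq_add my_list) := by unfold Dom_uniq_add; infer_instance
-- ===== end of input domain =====

-- B sorts first and sums elements that differ from their predecessor (adjacency dedup) instead of A's set-guarded single pass; objective: alternative.


-- ===== PORT A =====
-- for i in my_list: if i in added: continue; res += i; added.add(i)
def uniq_add (my_list : List Int) : Int :=
  (my_list.foldl
    (fun (st : PySem.Set Int × Int) i =>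
      if PySem.Set.contains st.1 i then st
      else (PySem.Set.add st.1 i, st.2 + i))
    (PySem.Set.empty, 0)).2

-- ===== PORT B =====
-- res = 0; prev = sentinel; for v in sorted(my_list): if v != prev: res += v; prev = v
def uniq_add_alt (my_list : List Int) : Int :=
  ((PySem.List.sorted my_list (fun x => x) false).foldl
    (fun (st : Option Int × Int) v =>
      if st.1 ≠ some v then (some v, st.2 + v) else st)
    (none, 0)).2

-- ===== PRECONDITION & SPEC =====
def Spec_uniq_add (my_list : List Int) (out : Int) : Prop := out = uniq_add_alt my_list
instance (my_list : List Int) (out : Int) : Decidable (Spec_uniq_add my_list out) := by unfold Spec_uniq_add; infer_instance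

-- ===== CLAIM (what is proved, stated in full; the proofs are below) =====
def Claim_equal_uniq_add : Prop := ∀ (my_list : List Int), Dom_uniq_add my_list → Spec_uniq_add my_list (uniq_add my_list)

-- ===== LEMMAS AND PROOFS =====
-- A's loop invariant: the fold from state (s, r) adds exactly the sum of the elements newly added to s.
theorem uniq_add_loop (xs : List Int) : ∀ (s : PySem.Set Int) (r : Int),
    (xs.foldl
      (fun (st : PySem.Set Int × Int) i =>
        if PySem.Set.contains st.1 i then st
        else (PySem.Set.add st.1 i, st.2 + i))
      (s, r)).2 = r + (PySem.Set.update s xs).sum - s.sum := by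
  induction xs with
  | nil => intro s r; simp [PySem.Set.update]
  | cons x xs ih =>
    intro s r
    by_cases hm : x ∈ s
    · have hadd : PySem.Set.add s x = s := by simp [PySem.Set.add, hm]
      simpa [List.foldl_cons, hm, PySem.Set.update, hadd] using ih s r
    · have hadd : PySem.Set.add s x = s ++ [x] := by simp [PySem.Set.add, hm]
      have hih := ih (s ++ [x]) (r + x)
      simp [PySem.Set.update, List.sum_append] at hih
      simp [List.foldl_cons, hm, PySem.Set.update, hih]
      ring

-- Sum of a duplicate-free list containing y splits off y.
theorem sum_split (l : List Int) (hnd : l.Nodup) (y : Int) (hm : y ∈ l) :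
    l.sum = y + (l.filter (fun x => decide (x ≠ y))).sum := by
  have hperm := List.perm_cons_erase hm
  have he : l.erase y = l.filter (fun x => decide (x ≠ y)) := by
    simpa using List.Nodup.erase_eq_filter hnd y
  calc l.sum = (y :: l.erase y).sum := hperm.sum_eq
    _ = y + (l.filter (fun x => decide (x ≠ y))).sum := by rw [he]; simp

-- B's scan invariant on a sorted tail: with previous value p bounding the tail below,
-- the scan adds each distinct value of the tail except p itself.
theorem scan_loop (ys : List Int) (hs : ys.Pairwise (· ≤ ·)) :
    ∀ (p r : Int), (∀ y ∈ ys, p ≤ y) →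
    (ys.foldl
      (fun (st : Option Int × Int) v =>
        if st.1 ≠ some v then (some v, st.2 + v) else st)
      (some p, r)).2 = r + ((ys.dedup.filter (fun x => decide (x ≠ p))).sum) := by
  induction ys with
  | nil => intro p r _; simp
  | cons y ys ih =>
    intro p r hlb
    have hs' := (List.pairwise_cons.mp hs).2
    have hy := (List.pairwise_cons.mp hs).1
    by_cases hyp : y = p
    · subst hyp
      have hfe : (y :: ys).dedup.filter (fun x => decide (x ≠ y))
          = ys.dedup.filter (fun x => decide (x ≠ y)) := by
        by_cases hmem : y ∈ ys
        · simp [List.dedup_cons_of_mem hmem]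
        · simp [List.dedup_cons_of_notMem hmem]
      simp only [List.foldl_cons, ne_eq, not_true_eq_false, hfe]
      exact ih hs' y r hy
    · have hlt : p < y := lt_of_le_of_ne (hlb y (by simp)) (fun h => hyp h.symm)
      have hstep : ((y :: ys).foldl
          (fun (st : Option Int × Int) v =>
            if st.1 ≠ some v then (some v, st.2 + v) else st)
          (some p, r)).2
          = (ys.foldl (fun (st : Option Int × Int) v =>
            if st.1 ≠ some v then (some v, st.2 + v) else st) (some y, r + y)).2 := by
        simp [List.foldl_cons, Ne.symm hyp]
      have hpn : ∀ x ∈ (y :: ys).dedup, x ≠ p := by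
        intro x hx
        rcases List.mem_cons.mp (List.mem_dedup.mp hx) with h | h
        · subst h; omega
        · have := hy x h; omega
      have hfe : (y :: ys).dedup.filter (fun x => decide (x ≠ p)) = (y :: ys).dedup := by
        apply List.filter_eq_self.mpr
        intro x hx; simpa using hpn x hx
      rw [hstep, ih hs' y (r + y) hy, hfe]
      by_cases hmem : y ∈ ys
      · have hmd : y ∈ ys.dedup := List.mem_dedup.mpr hmem
        rw [List.dedup_cons_of_mem hmem,
          sum_split ys.dedup (List.nodup_dedup ys) y hmd]
        ring
      · rw [List.dedup_cons_of_notMem hmem]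
        have : ys.dedup.filter (fun x => decide (x ≠ y)) = ys.dedup := by
          apply List.filter_eq_self.mpr
          intro x hx
          have := List.mem_dedup.mp hx
          simp only [decide_eq_true_eq]
          intro h; exact hmem (h ▸ this)
        rw [this]
        simp [List.sum_cons]
        ring

-- PySem.List.dedup and Mathlib dedup of the sorted list have the same sum (both nodup, same members).
theorem dedup_sum_eq (xs : List Int) :
    (PySem.List.dedup xs).sum = ((PySem.List.sorted xs (fun x => x) false).dedup).sum := by
  apply List.Perm.sum_eq
  apply (List.perm_ext_iff_of_nodup (by simp [PySem.List.dedup_eq_ofList, PySem.Set.nodup_ofList]) (List.nodup_dedup _)).mpr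
  intro x
  simp [List.mem_dedup, PySem.List.mem_sorted]

theorem uniq_add_spec : Claim_equal_uniq_add := by
  intro xs _
  show uniq_add xs = uniq_add_alt xs
  unfold uniq_add uniq_add_alt
  rw [uniq_add_loop xs PySem.Set.empty 0]
  have hA : (PySem.Set.update PySem.Set.empty xs).sum - (PySem.Set.empty : PySem.Set Int).sum
      = (PySem.List.dedup xs).sum := by
    simp [PySem.Set.update, PySem.Set.empty, PySem.List.dedup_eq_ofList, PySem.Set.ofList_eq_foldl]
  cases hcase : PySem.List.sorted xs (fun x => x) false with
  | nil =>
    have h0 : (PySem.List.dedup xs).sum = 0 := by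
      rw [dedup_sum_eq, hcase]; simp
    simp only [List.foldl_nil]
    omega
  | cons m t =>
    have hmin : ∀ y ∈ xs, m ≤ y := by
      simpa using PySem.List.key_head_sorted_le xs (fun x => x) hcase
    have hmin' : ∀ y ∈ t, m ≤ y := by
      intro y hyt
      exact hmin y ((PySem.List.mem_sorted xs (fun x => x) false y).mp
        (hcase ▸ List.mem_cons_of_mem m hyt))
    have hsorted : (m :: t).Pairwise (· ≤ ·) := by
      have := PySem.List.sorted_pairwise xs (fun x => x)
      rw [hcase] at this
      simpa using this
    have hst : t.Pairwise (· ≤ ·) := (List.pairwise_cons.mp hsorted).2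
    have hX : (PySem.List.dedup xs).sum = ((m :: t).dedup).sum := by
      rw [dedup_sum_eq, hcase]
    simp only [List.foldl_cons]
    rw [if_pos (by simp)]
    rw [scan_loop t hst m (0 + m) hmin']
    rw [hX] at hA
    by_cases hmem : m ∈ t
    · rw [List.dedup_cons_of_mem hmem,
        sum_split t.dedup (List.nodup_dedup t) m (List.mem_dedup.mpr hmem)] at hA
      omega
    · rw [List.dedup_cons_of_notMem hmem] at hA
      have hfe : t.dedup.filter (fun x => decide (x ≠ m)) = t.dedup := by
        apply List.filter_eq_self.mpr
        intro x hx
        have := List.mem_dedup.mp hx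
        simp only [decide_eq_true_eq]
        intro h; exact hmem (h ▸ this)
      rw [hfe]
      simp only [List.sum_cons] at hA
      omega
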